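-- pv_equiv track=rewrite | github.com/Hojun1123/Daily-Coding-Problem | 프로그래머스/2/138476. 귤 고르기/귤 고르기.py | solution
-- ===== SOURCE A (Python) =====
-- from collections import defaultdict
--
-- def solution(k, tangerine):
--     table = defaultdict(int)
--     for i in tangerine:
--         table[i] += 1
--     table = sorted(table.items(), key = lambda x : x[1], reverse = True)
--     subsum = 0
--     answer = 0
--     for _k, _v in table:
--         answer += 1
--         subsum += _v
--         if subsum >= k:
--             return answer
-- ===== SOURCE B (Python) =====
-- def solution(k, tangerine):
--     cnt = {}
--     for t in tangerine:
--         cnt[t] = cnt.get(t, 0) + 1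
--     fof = {}
--     for c in cnt.values():
--         fof[c] = fof.get(c, 0) + 1
--     subsum = 0
--     answer = 0
--     f = len(tangerine)
--     while f > 0:
--         for _ in range(fof.get(f, 0)):
--             answer += 1
--             subsum += f
--             if subsum >= k:
--                 return answer
--         f -= 1
-- ===== Notes on version B (the rewrite author's own statement) =====
-- stated objective: alternative
-- what changed: Replaces A's comparison sort of (size,count) items plus greedy scan by a counting-sort-style pass: a frequency-of-frequencies histogram is built and frequency values are walked from len(tangerine) down to 1, accumulating counts until k is reached.
-- outside the precondition, e.g. on solution(5, [1]): A returns None, B returns None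
import Mathlib
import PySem

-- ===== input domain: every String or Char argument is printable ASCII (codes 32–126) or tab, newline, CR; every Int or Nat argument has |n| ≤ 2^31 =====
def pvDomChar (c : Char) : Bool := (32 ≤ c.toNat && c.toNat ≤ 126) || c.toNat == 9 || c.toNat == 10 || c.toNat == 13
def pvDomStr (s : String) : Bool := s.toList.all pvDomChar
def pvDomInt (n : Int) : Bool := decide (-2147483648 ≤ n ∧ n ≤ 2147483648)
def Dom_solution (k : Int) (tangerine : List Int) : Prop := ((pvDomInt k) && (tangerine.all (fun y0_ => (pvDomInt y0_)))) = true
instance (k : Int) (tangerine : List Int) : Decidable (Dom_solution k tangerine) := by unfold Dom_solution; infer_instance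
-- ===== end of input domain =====

-- B replaces A's comparison sort of the (size, count) items followed by a greedy scan with a
-- counting-sort-style bucketed pass over a frequency-of-frequencies histogram (alternative algorithm).

-- ===== PORT A =====
-- A's 'for _k, _v in table' loop with early return; none = the loop fell off (Python returns None).
def solutionLoopA (k : Int) : List (Int × Int) → Int → Int → Option Int
  | [], _, _ => none
  | (_, v) :: rest, subsum, answer =>
      let answer' := answer + 1
      let subsum' := subsum + v
      if subsum' ≥ k then some answer' else solutionLoopA k rest subsum' answer'

-- Where Python A returns None (excluded by Pre_solution) the port returns the placeholder 0.
def solution (k : Int) (tangerine : List Int) : Int :=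
  let table := tangerine.foldl (fun d i => d.modify i 0 (· + 1)) PySem.Dict.empty
  let tableSorted := PySem.List.sorted table.items (fun x => x.2) true
  (solutionLoopA k tableSorted 0 0).getD 0

-- ===== PORT B =====
-- the inner 'for _ in range(fof.get(f, 0))' loop: .inl = early return, .inr = updated (subsum, answer)
def solutionInnerB (k f : Int) : Nat → Int → Int → Int ⊕ (Int × Int)
  | 0, subsum, answer => .inr (subsum, answer)
  | m + 1, subsum, answer =>
      let answer' := answer + 1
      let subsum' := subsum + f
      if subsum' ≥ k then .inl answer' else solutionInnerB k f m subsum' answer'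

-- the outer 'while f > 0' loop, recursing on f as a Nat
def solutionLoopB (k : Int) (fof : PySem.Dict Int Int) : Nat → Int → Int → Option Int
  | 0, _, _ => none
  | f + 1, subsum, answer =>
      match solutionInnerB k ((f : Int) + 1) (fof.getD ((f : Int) + 1) 0).toNat subsum answer with
      | .inl a => some a
      | .inr (s, a) => solutionLoopB k fof f s a

-- Where Python B returns None (excluded by Pre_solution) the port returns the placeholder 0.
def solution_alt (k : Int) (tangerine : List Int) : Int :=
  let cnt := tangerine.foldl (fun d t => d.insert t (d.getD t 0 + 1)) PySem.Dict.empty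
  let fof := cnt.values.foldl (fun d c => d.insert c (d.getD c 0 + 1)) PySem.Dict.empty
  (solutionLoopB k fof tangerine.length 0 0).getD 0

-- ===== PRECONDITION & SPEC =====
-- Pre_ excludes exactly the inputs (empty list, or k greater than len(tangerine)) on which
-- Python A falls off its loop and returns None, which is not an int.
def Pre_solution (k : Int) (tangerine : List Int) : Prop :=
  tangerine ≠ [] ∧ k ≤ tangerine.length
instance (k : Int) (tangerine : List Int) : Decidable (Pre_solution k tangerine) := by
  unfold Pre_solution; infer_instance

def pvWitness_solution : Int × List Int := (2, [3, 3, 5])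

def Spec_solution (k : Int) (tangerine : List Int) (out : Int) : Prop := out = solution_alt k tangerine
instance (k : Int) (tangerine : List Int) (out : Int) : Decidable (Spec_solution k tangerine out) := by unfold Spec_solution; infer_instance

-- ===== CLAIM (what is proved, stated in full; the proofs are below) =====
def Claim_equal_solution : Prop := ∀ (k : Int) (tangerine : List Int), Dom_solution k tangerine → Pre_solution k tangerine → Spec_solution k tangerine (solution k tangerine)

-- ===== LEMMAS AND PROOFS =====

-- the common greedy kernel: scan a list of counts, stopping when the running sum reaches k
def greedy (k : Int) : List Int → Int → Int → Option Int
  | [], _, _ => none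
  | v :: rest, subsum, answer =>
      if subsum + v ≥ k then some (answer + 1) else greedy k rest (subsum + v) (answer + 1)

theorem loopA_eq_greedy (k : Int) (l : List (Int × Int)) :
    ∀ s a, solutionLoopA k l s a = greedy k (l.map (·.2)) s a := by
  induction l with
  | nil => intro s a; rfl
  | cons p rest ih =>
      intro s a
      obtain ⟨x, v⟩ := p
      simp only [solutionLoopA, greedy, List.map]
      split_ifs <;> simp [ih]

theorem innerB_eq_greedy (k f : Int) (m : Nat) :
    ∀ (rest : List Int) (s a : Int),
      (match solutionInnerB k f m s a with
       | .inl x => some x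
       | .inr (s', a') => greedy k rest s' a') = greedy k (List.replicate m f ++ rest) s a := by
  induction m with
  | zero => intro rest s a; rfl
  | succ m ih =>
      intro rest s a
      simp only [solutionInnerB, List.replicate, List.cons_append, greedy]
      split_ifs <;> simp [ih]

-- the descending multiset of counts B walks through
def expandFof (fof : PySem.Dict Int Int) : Nat → List Int
  | 0 => []
  | f + 1 => List.replicate (fof.getD ((f : Int) + 1) 0).toNat ((f : Int) + 1) ++ expandFof fof f

theorem loopB_eq_greedy (k : Int) (fof : PySem.Dict Int Int) (n : Nat) :
    ∀ s a, solutionLoopB k fof n s a = greedy k (expandFof fof n) s a := by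
  induction n with
  | zero => intro s a; rfl
  | succ f ih =>
      intro s a
      simp only [solutionLoopB, expandFof]
      rw [← innerB_eq_greedy k ((f : Int) + 1) (fof.getD ((f : Int) + 1) 0).toNat (expandFof fof f) s a]
      cases solutionInnerB k ((f : Int) + 1) (fof.getD ((f : Int) + 1) 0).toNat s a with
      | inl x => rfl
      | inr p => obtain ⟨s', a'⟩ := p; simp [ih]

theorem mem_expandFof {fof : PySem.Dict Int Int} {n : Nat} {x : Int}
    (hx : x ∈ expandFof fof n) : 1 ≤ x ∧ x ≤ (n : Int) := by
  induction n with
  | zero => simp [expandFof] at hx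
  | succ f ih =>
      simp only [expandFof, List.mem_append, List.mem_replicate] at hx
      rcases hx with ⟨-, rfl⟩ | h
      · constructor <;> omega
      · obtain ⟨h1, h2⟩ := ih h
        push_cast
        omega

theorem pairwise_expandFof (fof : PySem.Dict Int Int) (n : Nat) :
    (expandFof fof n).Pairwise (fun a b => b ≤ a) := by
  induction n with
  | zero => exact List.Pairwise.nil
  | succ f ih =>
      simp only [expandFof]
      rw [List.pairwise_append]
      refine ⟨List.pairwise_replicate.mpr (Or.inr le_rfl), ih, ?_⟩
      intro a ha b hb
      rw [List.mem_replicate] at ha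
      have := mem_expandFof hb
      omega

theorem count_expandFof (fof : PySem.Dict Int Int) (n : Nat) (g : Int)
    (hg : 1 ≤ g ∧ g ≤ (n : Int)) :
    (expandFof fof n).count g = (fof.getD g 0).toNat := by
  induction n with
  | zero => omega
  | succ f ih =>
      simp only [expandFof, List.count_append, List.count_replicate]
      by_cases hgf : g = (f : Int) + 1
      · subst hgf
        have hz : (expandFof fof f).count ((f : Int) + 1) = 0 := by
          rw [List.count_eq_zero]
          intro hmem
          have := mem_expandFof hmem
          omega
        simp [hz]
      · have : (f : Int) + 1 ≠ g := fun h => hgf h.symm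
        rw [if_neg (by simpa using this)]
        have hg' : 1 ≤ g ∧ g ≤ (f : Int) := by push_cast at hg ⊢; omega
        simp [ih hg']

theorem count_expandFof_zero (fof : PySem.Dict Int Int) (n : Nat) (g : Int)
    (hg : ¬ (1 ≤ g ∧ g ≤ (n : Int))) : (expandFof fof n).count g = 0 := by
  rw [List.count_eq_zero]
  intro hmem
  exact hg (mem_expandFof hmem)

-- the list of counts of the distinct sizes, as B's dict produces it
theorem solution_alt_eq_greedy (k : Int) (tangerine : List Int) :
    solution_alt k tangerine =
      (greedy k (expandFof (PySem.Dict.counter ((PySem.Dict.counter tangerine).values))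
          tangerine.length) 0 0).getD 0 := by
  show (solutionLoopB k
      ((PySem.Dict.counter tangerine).values.foldl
        (fun d c => d.insert c (d.getD c 0 + 1)) PySem.Dict.empty) tangerine.length 0 0).getD 0 = _
  rw [PySem.Dict.foldl_insert_getD_add_one_eq_counter, loopB_eq_greedy]

theorem vals_mem_bounds (tangerine : List Int) (x : Int)
    (hx : x ∈ (PySem.Dict.counter tangerine).values) :
    1 ≤ x ∧ x ≤ (tangerine.length : Int) := by
  have hvals : (PySem.Dict.counter tangerine).values
      = (PySem.Set.ofList tangerine).map (fun k => (tangerine.count k : Int)) := by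
    simp [PySem.Dict.values, PySem.Dict.items_counter, List.map_map, Function.comp]
  rw [hvals, List.mem_map] at hx
  obtain ⟨key, hkey, rfl⟩ := hx
  have hmem : key ∈ tangerine := (PySem.Set.mem_ofList _ _).mp hkey
  have h1 : 1 ≤ tangerine.count key := List.one_le_count_iff.mpr hmem
  have h2 : tangerine.count key ≤ tangerine.length := List.count_le_length
  constructor <;> exact_mod_cast (by omega : _)

-- the central fact: B's descending bucket expansion IS A's reverse-sorted count list
theorem expand_eq_sortedCounts (tangerine : List Int) :
    expandFof (PySem.Dict.counter ((PySem.Dict.counter tangerine).values)) tangerine.length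
      = (PySem.List.sorted (PySem.Dict.counter tangerine).items (fun x => x.2) true).map (·.2) := by
  set vals := (PySem.Dict.counter tangerine).values with hvals
  set L := expandFof (PySem.Dict.counter vals) tangerine.length with hL
  set R := (PySem.List.sorted (PySem.Dict.counter tangerine).items (fun x => x.2) true).map (·.2) with hR
  have hperm : L.Perm vals := by
    rw [List.perm_iff_count]
    intro g
    by_cases hg : 1 ≤ g ∧ g ≤ (tangerine.length : Int)
    · rw [hL, count_expandFof _ _ _ hg, PySem.Dict.getD_counter]
      simp
    · rw [hL, count_expandFof_zero _ _ _ hg]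
      symm
      rw [List.count_eq_zero]
      intro hmem
      exact hg (vals_mem_bounds tangerine g hmem)
  have hpermR : R.Perm vals := by
    have h1 : (PySem.List.sorted (PySem.Dict.counter tangerine).items (fun x => x.2) true).Perm
        (PySem.Dict.counter tangerine).items := PySem.List.sorted_perm _ _ _
    have := h1.map (·.2)
    simpa [hR, PySem.Dict.values] using this
  have hpl : L.Pairwise (fun a b => b ≤ a) := pairwise_expandFof _ _
  have hpr : R.Pairwise (fun a b => b ≤ a) := by
    have := PySem.List.sorted_pairwise_rev (PySem.Dict.counter tangerine).items (fun x => x.2)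
    rw [hR]
    exact (List.pairwise_map).mpr this
  exact List.Perm.eq_of_pairwise (fun a b _ _ h1 h2 => le_antisymm h2 h1) hpl hpr
    (hperm.trans hpermR.symm)

-- ===== VERDICT (by name: the statement is the Claim_ definition above) =====
theorem solution_spec : Claim_equal_solution := by
  intro k tangerine _ _
  unfold Spec_solution
  show (solutionLoopA k
      (PySem.List.sorted (tangerine.foldl (fun d i => d.modify i 0 (· + 1))
        PySem.Dict.empty).items (fun x => x.2) true) 0 0).getD 0 = _
  rw [← PySem.Dict.counter_eq_foldl, loopA_eq_greedy, solution_alt_eq_greedy,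
      expand_eq_sortedCounts]
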